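-- pv_equiv track=rewrite | github.com/JakubKazimierski/PythonPortfolio | Hard/RomanNumeralReduction/RomanNumeralReduction.py | RomanNumeralReduction
-- ===== SOURCE A (Python) =====
-- def RomanNumeralReduction(strParam):
--     '''
--     Have the function RomanNumeralReduction(str)
--     read str which will be a string of roman numerals
--     in decreasing order. The numerals being used are:
--     I for 1, V for 5, X for 10, L for 50, C for 100, D for 500 and M for 1000.
--     Your program should return the same number given
--     by str using a smaller set of roman numerals.
--
--     For example: if str is "LLLXXXVVVV" this is 200,
--     so your program should return CC because this is
--     the shortest way to write 200 using the roman numeral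
--     system given above. If a string is given in its
--     shortest form, just return that same string.
--     '''
--
--     dictionary = {'I' : 1, 'V' : 5, 'X' : 10, 'L' : 50, 'C' : 100, 'D' : 500, 'M' : 1000 }
--
--     reverse_dict = {1000 : 'M', 900: 'CM', 500 : 'D', 400 : 'CD', 100 : 'C', 90 : 'XC', 50 : 'L',\
--      40 : 'XL', 10 : 'X', 9 : 'IX',  5 : 'V', 4 : 'IV', 1 : 'I'}
--
--     int_val = 0
--
--     # below converts Romanian input to decimal
--     for char_id in range(1, len(strParam)):
--         if dictionary[strParam[char_id]] > dictionary[strParam[char_id-1]]: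
--             int_val -= dictionary[strParam[char_id-1]]
--         else:
--             # if first value wasn't substraction
--             if int_val == 0:
--                 int_val += dictionary[strParam[0]]
--         int_val += dictionary[strParam[char_id]]
--
--     # below converts decimal to proper Romanian
--     output = ""
--     for key, value in reverse_dict.items():
--         division = int_val // key
--
--         if division == 0:
--             continue
--
--         for _ in range(division):
--             output += value
--
--         int_val = int_val - division*key
--
--
--     return output
-- ===== SOURCE B (Python) =====
-- def RomanNumeralReduction(strParam):
--     values = {'I': 1, 'V': 5, 'X': 10, 'L': 50, 'C': 100, 'D': 500, 'M': 1000}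
--     vals = [values[c] for c in strParam]
--     n = 0
--     for prev, cur in zip(vals, vals[1:]):
--         if cur > prev:
--             n += cur - prev
--         else:
--             if n == 0:
--                 n += vals[0]
--             n += cur
--     HUND = ["", "C", "CC", "CCC", "CD", "D", "DC", "DCC", "DCCC", "CM"]
--     TENS = ["", "X", "XX", "XXX", "XL", "L", "LX", "LXX", "LXXX", "XC"]
--     ONES = ["", "I", "II", "III", "IV", "V", "VI", "VII", "VIII", "IX"]
--     return "M" * (n // 1000) + HUND[n // 100 % 10] + TENS[n // 10 % 10] + ONES[n % 10]
-- ===== Notes on version B (the rewrite author's own statement) =====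
-- stated objective: alternative
-- what changed: The greedy 13-entry subtractive-pair encoder (repeated floor division and string repetition over the [1000,900,...,1] table) is replaced by a positional digit encoder: 'M' repeated n//1000 times plus constant 10-entry lookup tables for the hundreds, tens and units digits; the decoder is re-shaped as a scan over adjacent value pairs instead of index arithmetic.
-- outside the precondition, e.g. on RomanNumeralReduction('Z'): A returns '', B raises KeyError
import Mathlib
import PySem

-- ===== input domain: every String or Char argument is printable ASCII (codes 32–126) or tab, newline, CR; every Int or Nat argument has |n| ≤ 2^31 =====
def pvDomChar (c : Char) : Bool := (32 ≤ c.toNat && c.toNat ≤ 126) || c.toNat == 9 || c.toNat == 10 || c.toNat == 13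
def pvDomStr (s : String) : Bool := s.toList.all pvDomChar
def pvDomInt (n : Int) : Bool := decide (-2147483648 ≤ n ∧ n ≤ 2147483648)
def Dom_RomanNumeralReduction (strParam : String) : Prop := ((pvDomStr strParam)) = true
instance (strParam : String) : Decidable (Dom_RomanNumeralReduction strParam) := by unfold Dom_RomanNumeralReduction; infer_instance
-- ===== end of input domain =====

-- B replaces A's greedy 13-entry encoder by a positional digit encoder (constant
-- tables for hundreds/tens/units plus 'M' repetition) and re-shapes the decoder
-- as a scan over adjacent value pairs; objective: alternative (same cost).

-- ===== PORT A =====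
def pvDictA : PySem.Dict Char Int :=
  PySem.Dict.ofList [('I', 1), ('V', 5), ('X', 10), ('L', 50), ('C', 100), ('D', 500), ('M', 1000)]

def pvRevDictA : List (Int × List Char) :=
  [(1000, ['M']), (900, ['C','M']), (500, ['D']), (400, ['C','D']), (100, ['C']),
   (90, ['X','C']), (50, ['L']), (40, ['X','L']), (10, ['X']), (9, ['I','X']),
   (5, ['V']), (4, ['I','V']), (1, ['I'])]

-- 'division = int_val // key; if division == 0: continue; for _ in range(division): output += value;
--  int_val = int_val - division*key' — the body of A's encoding loop, one fold step.
def pvStepA : List Char × Int → Int × List Char → List Char × Int := fun st kv =>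
  let division := PySem.Int.floordiv st.2 kv.1
  if division = 0 then st
  else ((List.replicate division.toNat kv.2).foldl (fun o v => o ++ v) st.1,
        st.2 - division * kv.1)

-- dictionary[strParam[i]]: under Pre_ every character is a key of the dict, so the
-- getD defaults (KeyError in Python) are never reached.
def RomanNumeralReduction (strParam : String) : String :=
  let s := strParam.toList
  let int_val : Int :=
    (PySem.List.pyRange 1 (PySem.List.len s) 1).foldl (fun iv i =>
      let cur := PySem.Dict.getD pvDictA (PySem.List.pyGetD s i ' ') 0
      let prev := PySem.Dict.getD pvDictA (PySem.List.pyGetD s (i - 1) ' ') 0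
      let iv := if cur > prev then iv - prev
                else if iv = 0 then iv + PySem.Dict.getD pvDictA (PySem.List.pyGetD s 0 ' ') 0
                else iv
      iv + cur) 0
  let res := pvRevDictA.foldl pvStepA ([], int_val)
  String.ofList res.1

-- ===== PORT B =====
def pvDictB : PySem.Dict Char Int :=
  PySem.Dict.ofList [('I', 1), ('V', 5), ('X', 10), ('L', 50), ('C', 100), ('D', 500), ('M', 1000)]

def pvHund : List (List Char) :=
  [[], ['C'], ['C','C'], ['C','C','C'], ['C','D'], ['D'], ['D','C'], ['D','C','C'], ['D','C','C','C'], ['C','M']]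
def pvTens : List (List Char) :=
  [[], ['X'], ['X','X'], ['X','X','X'], ['X','L'], ['L'], ['L','X'], ['L','X','X'], ['L','X','X','X'], ['X','C']]
def pvOnes : List (List Char) :=
  [[], ['I'], ['I','I'], ['I','I','I'], ['I','V'], ['V'], ['V','I'], ['V','I','I'], ['V','I','I','I'], ['I','X']]

-- values[c]: under Pre_ every character is a key of the dict, so the getD default
-- (KeyError in Python) is never reached.
def RomanNumeralReduction_alt (strParam : String) : String :=
  let vals := strParam.toList.map (fun c => PySem.Dict.getD pvDictB c 0)
  let n : Int := (vals.zip vals.tail).foldl (fun n pc =>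
      if pc.2 > pc.1 then n + (pc.2 - pc.1)
      else if n = 0 then n + vals.headD 0 + pc.2
      else n + pc.2) 0
  String.ofList (List.replicate (PySem.Int.floordiv n 1000).toNat 'M'
    ++ PySem.List.pyGetD pvHund (PySem.Int.mod (PySem.Int.floordiv n 100) 10) []
    ++ PySem.List.pyGetD pvTens (PySem.Int.mod (PySem.Int.floordiv n 10) 10) []
    ++ PySem.List.pyGetD pvOnes (PySem.Int.mod n 10) [])

-- ===== PRECONDITION & SPEC =====
-- Pre_ excludes strings containing a character other than I,V,X,L,C,D,M: on those of
-- length ≥ 2 A raises KeyError; on those of length ≤ 1 A's loop never runs and it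
-- returns "" by accident while B's natural key lookup raises KeyError.
def Pre_RomanNumeralReduction (strParam : String) : Prop :=
  strParam.toList.all (fun c => c ∈ (['I','V','X','L','C','D','M'] : List Char)) = true
instance (strParam : String) : Decidable (Pre_RomanNumeralReduction strParam) := by
  unfold Pre_RomanNumeralReduction; infer_instance

def pvWitness_RomanNumeralReduction : String := "LLLXXXVVVV"

def Spec_RomanNumeralReduction (strParam : String) (out : String) : Prop := out = RomanNumeralReduction_alt strParam
instance (strParam : String) (out : String) : Decidable (Spec_RomanNumeralReduction strParam out) := by unfold Spec_RomanNumeralReduction; infer_instance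

-- ===== CLAIM (what is proved, stated in full; the proofs are below) =====
def Claim_equal_RomanNumeralReduction : Prop := ∀ (strParam : String), Dom_RomanNumeralReduction strParam → Pre_RomanNumeralReduction strParam → Spec_RomanNumeralReduction strParam (RomanNumeralReduction strParam)

-- ===== LEMMAS AND PROOFS =====

lemma pvDictB_eq : pvDictB = pvDictA := rfl

-- the 12 entries of reverse_dict after the leading (1000, 'M')
def pvRest : List (Int × List Char) := pvRevDictA.tail

-- the encoder's output on a remainder below 1000, started with empty output
def pvLow (r : Int) : List Char := (pvRest.foldl pvStepA ([], r)).1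

-- range(1, len(vals)) indexed at i-1 and i enumerates the adjacent pairs zip(vals, vals[1:])
lemma pvMapPairs (vals : List Int) :
    (PySem.List.pyRange 1 (vals.length : Int) 1).map
      (fun i => (PySem.List.pyGetD vals (i - 1) 0, PySem.List.pyGetD vals i 0))
      = vals.zip vals.tail := by
  apply List.ext_getElem
  · simp [PySem.List.length_pyRange_one]
  · intro k h1 h2
    have hk : k + 1 < vals.length := by
      simp only [List.length_map, PySem.List.length_pyRange_one] at h1; omega
    simp only [List.getElem_map, PySem.List.getElem_pyRange_one, List.getElem_zip, List.getElem_tail]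
    have e1 : (1 : Int) + (k : Int) - 1 = ((k : Nat) : Int) := by ring
    have e2 : (1 : Int) + (k : Int) = (((k + 1 : Nat)) : Int) := by push_cast; ring
    rw [e1, e2, PySem.List.pyGetD_natCast, PySem.List.pyGetD_natCast]
    rw [List.getD_eq_getElem _ _ (by omega), List.getD_eq_getElem _ _ hk]

-- A's index-based decoding loop equals B's adjacent-pair scan
lemma pvDecodeEq (s : List Char) :
    (PySem.List.pyRange 1 (PySem.List.len s) 1).foldl (fun iv i =>
      let cur := PySem.Dict.getD pvDictA (PySem.List.pyGetD s i ' ') 0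
      let prev := PySem.Dict.getD pvDictA (PySem.List.pyGetD s (i - 1) ' ') 0
      let iv := if cur > prev then iv - prev
                else if iv = 0 then iv + PySem.Dict.getD pvDictA (PySem.List.pyGetD s 0 ' ') 0
                else iv
      iv + cur) 0
    = (((s.map (fun c => PySem.Dict.getD pvDictA c 0)).zip
          (s.map (fun c => PySem.Dict.getD pvDictA c 0)).tail).foldl (fun n pc =>
        if pc.2 > pc.1 then n + (pc.2 - pc.1)
        else if n = 0 then n + (s.map (fun c => PySem.Dict.getD pvDictA c 0)).headD 0 + pc.2
        else n + pc.2) 0 : Int) := by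
  have hsp : PySem.Dict.getD pvDictA ' ' 0 = 0 := by decide
  have h1 : ∀ j : Int, PySem.Dict.getD pvDictA (PySem.List.pyGetD s j ' ') 0
      = PySem.List.pyGetD (s.map (fun c => PySem.Dict.getD pvDictA c 0)) j 0 := by
    intro j
    rw [← hsp]
    exact (PySem.List.pyGetD_map (fun c => PySem.Dict.getD pvDictA c 0) s j ' ').symm
  have hh : PySem.List.pyGetD (s.map (fun c => PySem.Dict.getD pvDictA c 0)) 0 0
      = (s.map (fun c => PySem.Dict.getD pvDictA c 0)).headD 0 := by
    rw [PySem.List.pyGetD_zero]; cases s <;> simp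
  rw [← pvMapPairs (s.map (fun c => PySem.Dict.getD pvDictA c 0)), List.foldl_map]
  have hlen : PySem.List.len s = ((s.map (fun c => PySem.Dict.getD pvDictA c 0)).length : Int) := by
    simp [PySem.List.len_eq]
  rw [hlen]
  apply PySem.List.foldl_congr_mem
  intro acc i _
  simp only [h1, hh]
  split_ifs <;> ring

-- the encoder fold only ever appends to the accumulated output
lemma pvPrefix (l : List (Int × List Char)) : ∀ (p : List Char) (m : Int),
    l.foldl pvStepA (p, m) = (p ++ (l.foldl pvStepA ([], m)).1, (l.foldl pvStepA ([], m)).2) := by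
  induction l with
  | nil => intro p m; simp
  | cons kv t ih =>
    intro p m
    simp only [List.foldl_cons]
    by_cases h : PySem.Int.floordiv m kv.1 = 0
    · have e1 : pvStepA (p, m) kv = (p, m) := by simp [pvStepA, h]
      have e2 : pvStepA ([], m) kv = ([], m) := by simp [pvStepA, h]
      rw [e1, e2, ih p m]
    · have e1 : pvStepA (p, m) kv
          = (p ++ (List.replicate (PySem.Int.floordiv m kv.1).toNat kv.2).flatten,
             m - PySem.Int.floordiv m kv.1 * kv.1) := by
        simp [pvStepA, h, PySem.List.foldl_append_eq_flatten]
      have e2 : pvStepA ([], m) kv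
          = ((List.replicate (PySem.Int.floordiv m kv.1).toNat kv.2).flatten,
             m - PySem.Int.floordiv m kv.1 * kv.1) := by
        simp [pvStepA, h, PySem.List.foldl_append_eq_flatten]
      rw [e1, e2, ih (p ++ (List.replicate (PySem.Int.floordiv m kv.1).toNat kv.2).flatten) _,
          ih ((List.replicate (PySem.Int.floordiv m kv.1).toNat kv.2).flatten) _]
      simp

-- peeling the (1000, 'M') entry off the greedy fold
lemma pvEncodeA (n : Int) :
    (pvRevDictA.foldl pvStepA ([], n)).1
      = List.replicate (PySem.Int.floordiv n 1000).toNat 'M' ++ pvLow (PySem.Int.mod n 1000) := by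
  have hfd : PySem.Int.floordiv n 1000 = n / 1000 := PySem.Int.floordiv_eq_ediv_of_pos (by norm_num)
  have hmd : PySem.Int.mod n 1000 = n % 1000 := PySem.Int.mod_eq_emod_of_pos (by norm_num)
  have hstep : pvStepA ([], n) (1000, ['M'])
      = (List.replicate (n / 1000).toNat 'M', n % 1000) := by
    by_cases h : n / 1000 = 0
    · simp [pvStepA, h]
      omega
    · simp [pvStepA, h, PySem.List.foldl_append_eq_flatten, List.flatten_replicate_singleton]
      omega
  rw [show pvRevDictA = (1000, ['M']) :: pvRest from rfl, List.foldl_cons, hstep, pvPrefix, hfd, hmd]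
  simp [pvLow]

set_option maxHeartbeats 4000000 in
set_option maxRecDepth 100000 in
-- the 12 remaining greedy entries produce exactly the positional digit strings (checked for all r < 1000)
lemma pvLowEqFin : ∀ r : Fin 1000, pvLow (r : Int) =
    PySem.List.pyGetD pvHund (PySem.Int.mod (PySem.Int.floordiv (r : Int) 100) 10) []
    ++ PySem.List.pyGetD pvTens (PySem.Int.mod (PySem.Int.floordiv (r : Int) 10) 10) []
    ++ PySem.List.pyGetD pvOnes (PySem.Int.mod (r : Int) 10) [] := by decide

lemma pvLowEq (r : Int) (h0 : 0 ≤ r) (h1 : r < 1000) : pvLow r =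
    PySem.List.pyGetD pvHund (PySem.Int.mod (PySem.Int.floordiv r 100) 10) []
    ++ PySem.List.pyGetD pvTens (PySem.Int.mod (PySem.Int.floordiv r 10) 10) []
    ++ PySem.List.pyGetD pvOnes (PySem.Int.mod r 10) [] := by
  have := pvLowEqFin ⟨r.toNat, by omega⟩
  simpa [Int.toNat_of_nonneg h0] using this

-- greedy encoding of any nonnegative value equals the positional digit encoding
lemma pvEncodeFull (n : Int) :
    (pvRevDictA.foldl pvStepA ([], n)).1
      = List.replicate (PySem.Int.floordiv n 1000).toNat 'M'
        ++ PySem.List.pyGetD pvHund (PySem.Int.mod (PySem.Int.floordiv n 100) 10) []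
        ++ PySem.List.pyGetD pvTens (PySem.Int.mod (PySem.Int.floordiv n 10) 10) []
        ++ PySem.List.pyGetD pvOnes (PySem.Int.mod n 10) [] := by
  rw [pvEncodeA n]
  have hnn : 0 ≤ PySem.Int.mod n 1000 := PySem.Int.mod_nonneg n (by norm_num)
  have hlt : PySem.Int.mod n 1000 < 1000 := PySem.Int.mod_lt n (by norm_num)
  rw [pvLowEq _ hnn hlt]
  have hm : PySem.Int.mod n 1000 = n % 1000 := PySem.Int.mod_eq_emod_of_pos (by norm_num)
  have e1 : PySem.Int.mod (PySem.Int.floordiv (PySem.Int.mod n 1000) 100) 10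
      = PySem.Int.mod (PySem.Int.floordiv n 100) 10 := by
    rw [hm, PySem.Int.floordiv_eq_ediv_of_pos (by norm_num : (0:Int) < 100),
        PySem.Int.floordiv_eq_ediv_of_pos (by norm_num : (0:Int) < 100),
        PySem.Int.mod_eq_emod_of_pos (by norm_num : (0:Int) < 10),
        PySem.Int.mod_eq_emod_of_pos (by norm_num : (0:Int) < 10)]
    omega
  have e2 : PySem.Int.mod (PySem.Int.floordiv (PySem.Int.mod n 1000) 10) 10
      = PySem.Int.mod (PySem.Int.floordiv n 10) 10 := by
    rw [hm, PySem.Int.floordiv_eq_ediv_of_pos (by norm_num : (0:Int) < 10),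
        PySem.Int.floordiv_eq_ediv_of_pos (by norm_num : (0:Int) < 10),
        PySem.Int.mod_eq_emod_of_pos (by norm_num : (0:Int) < 10),
        PySem.Int.mod_eq_emod_of_pos (by norm_num : (0:Int) < 10)]
    omega
  have e3 : PySem.Int.mod (PySem.Int.mod n 1000) 10 = PySem.Int.mod n 10 := by
    rw [hm, PySem.Int.mod_eq_emod_of_pos (by norm_num : (0:Int) < 10),
        PySem.Int.mod_eq_emod_of_pos (by norm_num : (0:Int) < 10)]
    omega
  rw [e1, e2, e3]
  simp [List.append_assoc]

-- ===== VERDICT (by name: the statement is the Claim_ definition above) =====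
theorem RomanNumeralReduction_spec : Claim_equal_RomanNumeralReduction := by
  intro strParam _ _
  unfold Spec_RomanNumeralReduction RomanNumeralReduction RomanNumeralReduction_alt
  simp only [pvDictB_eq]
  apply congrArg String.ofList
  rw [pvDecodeEq strParam.toList]
  rw [pvEncodeFull]
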